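-- pv_equiv track=rewrite | github.com/lagom130/lab | py-scripts/study/code/account_quanxian.py | str_to_hump
-- ===== SOURCE A (Python) =====
-- def str_to_hump(text):
--     arr = filter(None, text.lower().split('_'))
--     res = ''
--     for index, i in enumerate(arr):
--         f = i[0].lower()
--         if index is not 0:
--             f = f.upper()
--         res = res + f+i[1:]
--     return res
-- ===== SOURCE B (Python) =====
-- def str_to_hump(text):
--     out = []
--     started = False
--     cap_next = False
--     for ch in text.lower():
--         if ch == '_':
--             cap_next = started
--         else:
--             out.append(ch.upper() if cap_next else ch)
--             started = True
--             cap_next = False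
--     return ''.join(out)
-- ===== Notes on version B (the rewrite author's own statement) =====
-- stated objective: alternative
-- what changed: Replaced split('_')/filter/enumerate over tokens by a single character-level pass with two booleans (started, cap_next) that drops underscores and uppercases the first letter after an underscore once a word has started.
import Mathlib
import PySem

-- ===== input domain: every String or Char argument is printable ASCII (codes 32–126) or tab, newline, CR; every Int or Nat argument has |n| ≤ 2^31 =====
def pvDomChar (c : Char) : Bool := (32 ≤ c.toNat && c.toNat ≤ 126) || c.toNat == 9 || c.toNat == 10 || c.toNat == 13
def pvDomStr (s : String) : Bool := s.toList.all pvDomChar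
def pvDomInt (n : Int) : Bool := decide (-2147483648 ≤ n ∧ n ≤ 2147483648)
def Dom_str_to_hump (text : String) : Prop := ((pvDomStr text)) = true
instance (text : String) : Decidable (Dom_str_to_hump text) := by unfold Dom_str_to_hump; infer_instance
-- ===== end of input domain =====

-- B replaces A's split('_')/filter(None)/enumerate pipeline by a single character-level
-- state machine (started / cap_next) over the lowered text; same cost, different decomposition.

-- ===== PORT A =====
-- A's loop: res = res + f + i[1:]  (f = i[0].lower(), uppercased when the index is nonzero;
-- Python's `index is not 0` is `index != 0` for CPython's cached small ints)
def humpA (l : List Char) : List Char :=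
  let arr := (PySem.Chars.splitOn l ['_']).filter (fun w => !w.isEmpty)
  (PySem.List.enumerate arr).foldl
    (fun res p =>
      let f := PySem.Chars.lowerChar (PySem.List.pyGetD p.2 0 ' ')
      let f := if p.1 ≠ 0 then PySem.Chars.upperChar f else f
      res ++ [f] ++ PySem.List.slice p.2 (some 1) none)
    []

def str_to_hump (text : String) : String :=
  String.ofList (humpA (PySem.Chars.lower text.toList))

-- ===== PORT B =====
-- the for-loop of Source B: state (started, cap_next), chars emitted in order
def humpGo : List Char → Bool → Bool → List Char
  | [], _, _ => []
  | c :: rest, started, capNext =>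
    if c = '_' then humpGo rest started started
    else (if capNext then PySem.Chars.upperChar c else c) :: humpGo rest true false

def str_to_hump_alt (text : String) : String :=
  String.ofList (humpGo (PySem.Chars.lower text.toList) false false)

-- ===== PRECONDITION & SPEC =====
def Spec_str_to_hump (text : String) (out : String) : Prop := out = str_to_hump_alt text
instance (text : String) (out : String) : Decidable (Spec_str_to_hump text out) := by unfold Spec_str_to_hump; infer_instance

-- ===== CLAIM (what is proved, stated in full; the proofs are below) =====
def Claim_equal_str_to_hump : Prop := ∀ (text : String), Dom_str_to_hump text → Spec_str_to_hump text (str_to_hump text)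

-- ===== LEMMAS AND PROOFS =====

-- structural version of split on the single-char separator '_': (first token, remaining tokens)
def mySplit : List Char → List Char × List (List Char)
  | [] => ([], [])
  | c :: r => if c = '_' then ([], (mySplit r).1 :: (mySplit r).2)
              else (c :: (mySplit r).1, (mySplit r).2)

-- capitalize every token (empty tokens contribute nothing)
def capAll : List (List Char) → List Char
  | [] => []
  | [] :: ws => capAll ws
  | (h :: t) :: ws => (PySem.Chars.upperChar h :: t) ++ capAll ws

-- first nonempty token verbatim, the rest capitalized
def firstR : List (List Char) → List Char
  | [] => []
  | [] :: ws => firstR ws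
  | (c :: w) :: ws => c :: (w ++ capAll ws)

theorem splitOn_go_eq (fuel : Nat) : ∀ (l cur : List Char) (acc : List (List Char)),
    l.length ≤ fuel →
    PySem.Chars.splitOn.go ['_'] fuel l cur acc
      = acc.reverse ++ (cur.reverse ++ (mySplit l).1) :: (mySplit l).2 := by
  induction fuel with
  | zero =>
    intro l cur acc h
    have : l = [] := List.eq_nil_of_length_eq_zero (Nat.le_zero.mp h)
    subst this
    simp [PySem.Chars.splitOn.go, mySplit]
  | succ n ih =>
    intro l cur acc h
    cases l with
    | nil => simp [PySem.Chars.splitOn.go, mySplit]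
    | cons c rest =>
      by_cases hc : c = '_'
      · subst hc
        rw [PySem.Chars.splitOn.go]
        simp only [List.isPrefixOf, List.length_singleton, List.drop_one, List.tail_cons,
          beq_self_eq_true, Bool.and_eq_true, and_self, if_pos]
        rw [ih rest [] _ (by simpa using h)]
        simp [mySplit]
      · rw [PySem.Chars.splitOn.go]
        have hpre : List.isPrefixOf ['_'] (c :: rest) = false := by
          simp [List.isPrefixOf]
          intro h'; exact hc h'.symm
        rw [hpre]
        simp only [Bool.false_eq_true, if_false]
        rw [ih rest (c :: cur) acc (by simpa using h)]
        simp [mySplit, hc]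

theorem splitOn_eq (l : List Char) :
    PySem.Chars.splitOn l ['_'] = (mySplit l).1 :: (mySplit l).2 := by
  rw [PySem.Chars.splitOn, splitOn_go_eq _ _ _ _ (by omega)]
  simp

theorem humpGo_true (l : List Char) :
    humpGo l true true = capAll ((mySplit l).1 :: (mySplit l).2)
      ∧ humpGo l true false = (mySplit l).1 ++ capAll (mySplit l).2 := by
  induction l with
  | nil => simp [humpGo, mySplit, capAll]
  | cons c r ih =>
    by_cases hc : c = '_'
    · subst hc
      simp only [humpGo, mySplit]
      refine ⟨?_, ?_⟩ <;> simp only [reduceIte]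
      · exact ih.1
      · simpa [capAll] using ih.1
    · simp only [humpGo, mySplit, if_neg hc]
      exact ⟨by simp [capAll, ih.2], by simp [ih.2]⟩

theorem humpGo_false (l : List Char) :
    humpGo l false false = firstR ((mySplit l).1 :: (mySplit l).2) := by
  induction l with
  | nil => simp [humpGo, mySplit, firstR]
  | cons c r ih =>
    by_cases hc : c = '_'
    · subst hc
      simp only [humpGo, mySplit, firstR, reduceIte]
      exact ih
    · simp only [humpGo, mySplit, if_neg hc, firstR]
      simp [(humpGo_true r).2]

theorem toNat_ofNat_valid (n : Nat) (h : n.isValidChar) : (Char.ofNat n).toNat = n := by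
  unfold Char.ofNat
  rw [dif_pos h]
  simp [Char.ofNatAux, Char.toNat, UInt32.toNat_ofNatLT]

theorem notupper (c : Char) : PySem.Chars.isupper (PySem.Chars.lowerChar c) = false := by
  unfold PySem.Chars.lowerChar
  by_cases h : PySem.Chars.isupper c = true
  · rw [if_pos h]
    unfold PySem.Chars.isupper at *
    simp only [Bool.and_eq_true, decide_eq_true_eq] at h
    have h1 : (65:Nat) ≤ c.toNat := h.1
    have h2 : c.toNat ≤ (90:Nat) := h.2
    have hval : (c.toNat + 32).isValidChar := Or.inl (by omega)
    have htn : (Char.ofNat (c.toNat + 32)).toNat = c.toNat + 32 := toNat_ofNat_valid _ hval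
    have : ¬ (Char.ofNat (c.toNat + 32) ≤ 'Z') := by
      show ¬ ((Char.ofNat (c.toNat + 32)).toNat ≤ ('Z').toNat)
      have : ('Z').toNat = 90 := rfl
      omega
    simp [this]
  · rw [if_neg h]
    exact Bool.not_eq_true _ ▸ h

theorem lowerChar_idem (c : Char) :
    PySem.Chars.lowerChar (PySem.Chars.lowerChar c) = PySem.Chars.lowerChar c := by
  conv_lhs => rw [PySem.Chars.lowerChar]
  rw [notupper c]
  simp

theorem mySplit_mem (l : List Char) :
    (∀ c ∈ (mySplit l).1, c ∈ l) ∧ (∀ w ∈ (mySplit l).2, ∀ c ∈ w, c ∈ l) := by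
  induction l with
  | nil => simp [mySplit]
  | cons c r ih =>
    by_cases hc : c = '_' <;> simp only [mySplit, if_pos, hc, reduceIte]
    · refine ⟨by simp, ?_⟩
      intro w hw d hd
      rcases List.mem_cons.mp hw with hw' | hw'
      · subst hw'; exact List.mem_cons_of_mem _ (ih.1 d hd)
      · exact List.mem_cons_of_mem _ (ih.2 w hw' d hd)
    · refine ⟨?_, fun w hw d hd => List.mem_cons_of_mem _ (ih.2 w hw d hd)⟩
      intro d hd
      rcases List.mem_cons.mp hd with hd' | hd'
      · subst hd'; exact List.mem_cons_self
      · exact List.mem_cons_of_mem _ (ih.1 d hd')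

theorem capAll_filter (ws : List (List Char)) :
    capAll (ws.filter (fun w => !w.isEmpty)) = capAll ws := by
  induction ws with
  | nil => rfl
  | cons w ws ih =>
    cases w with
    | nil => simpa [capAll] using ih
    | cons c t => simpa [capAll] using ih

theorem firstR_filter (ts : List (List Char)) :
    firstR ts = (match ts.filter (fun w => !w.isEmpty) with
                 | [] => []
                 | v :: vs => v ++ capAll vs) := by
  induction ts with
  | nil => simp [firstR]
  | cons w ws ih =>
    cases w with
    | nil => simpa [firstR] using ih
    | cons c t =>
      simp only [firstR, List.filter_cons]
      have : (!(c :: t).isEmpty) = true := by simp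
      rw [this]
      simp [capAll_filter]

def gB (w : List Char) : List Char :=
  PySem.Chars.upperChar (PySem.Chars.lowerChar (PySem.List.pyGetD w 0 ' '))
    :: PySem.List.slice w (some 1) none

theorem foldA (vs : List (List Char)) : ∀ (s : Int) (acc : List Char), 1 ≤ s →
    (PySem.List.enumerate vs s).foldl
      (fun res p =>
        res ++ [if p.1 ≠ 0 then PySem.Chars.upperChar (PySem.Chars.lowerChar (PySem.List.pyGetD p.2 0 ' '))
                else PySem.Chars.lowerChar (PySem.List.pyGetD p.2 0 ' ')]
            ++ PySem.List.slice p.2 (some 1) none)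
      acc
    = acc ++ vs.flatMap gB := by
  induction vs with
  | nil => intro s acc _; simp [PySem.List.enumerate_nil]
  | cons v vs ih =>
    intro s acc hs
    rw [PySem.List.enumerate_cons, List.foldl_cons]
    rw [ih (s+1) _ (by omega)]
    have hne : (s ≠ 0) = True := by simp; omega
    simp only [hne, if_true]
    simp [gB]

theorem capAll_eq_flatMap (vs : List (List Char))
    (h : ∀ w ∈ vs, w ≠ [] ∧ ∀ c ∈ w, PySem.Chars.lowerChar c = c) :
    vs.flatMap gB = capAll vs := by
  induction vs with
  | nil => rfl
  | cons v vs ih =>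
    obtain ⟨hv, hc⟩ := h v List.mem_cons_self
    cases v with
    | nil => exact absurd rfl hv
    | cons c t =>
      rw [List.flatMap_cons, ih (fun w hw => h w (List.mem_cons_of_mem _ hw))]
      simp [gB, capAll, PySem.List.pyGetD_zero_cons, PySem.List.slice_from_one,
        hc c List.mem_cons_self]

theorem humpA_eq (l : List Char) (hl : ∀ c ∈ l, PySem.Chars.lowerChar c = c) :
    humpA l = firstR ((mySplit l).1 :: (mySplit l).2) := by
  unfold humpA
  rw [splitOn_eq, firstR_filter]
  have hmem := mySplit_mem l
  have hfs : ∀ w ∈ ((mySplit l).1 :: (mySplit l).2).filter (fun w => !w.isEmpty),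
      w ≠ [] ∧ ∀ c ∈ w, PySem.Chars.lowerChar c = c := by
    intro w hw
    have hne : ¬ w.isEmpty := by
      have := List.of_mem_filter hw
      simpa using this
    have hw' := List.mem_of_mem_filter hw
    refine ⟨by simpa [List.isEmpty_iff] using hne, ?_⟩
    intro c hc
    rcases List.mem_cons.mp hw' with h1 | h1
    · exact hl c (hmem.1 c (h1 ▸ hc))
    · exact hl c (hmem.2 w h1 c hc)
  cases hfil : ((mySplit l).1 :: (mySplit l).2).filter (fun w => !w.isEmpty) with
  | nil => dsimp only; simp [PySem.List.enumerate_nil]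
  | cons v vs =>
    rw [hfil] at hfs
    obtain ⟨hv, hvc⟩ := hfs v List.mem_cons_self
    dsimp only
    rw [PySem.List.enumerate_cons, List.foldl_cons]
    simp only [zero_add]
    rw [foldA vs 1 _ (by omega)]
    rw [capAll_eq_flatMap vs (fun w hw => hfs w (List.mem_cons_of_mem _ hw))]
    cases v with
    | nil => exact absurd rfl hv
    | cons c t =>
      simp [PySem.List.pyGetD_zero_cons, PySem.List.slice_from_one,
        hvc c List.mem_cons_self]

-- ===== VERDICT (by name: the statement is the Claim_ definition above) =====
theorem str_to_hump_spec : Claim_equal_str_to_hump := by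
  intro text _
  unfold Spec_str_to_hump str_to_hump str_to_hump_alt
  rw [humpGo_false, humpA_eq]
  intro c hc
  simp only [PySem.Chars.lower, List.mem_map] at hc
  obtain ⟨x, _, rfl⟩ := hc
  exact lowerChar_idem x
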